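-- pv_equiv track=rewrite | github.com/gui-terres/Circuitos-digitais | main.py | forma_matriz
-- ===== SOURCE A (Python) =====
-- def forma_matriz(tabcob_m, mintermos):
--     matriz_retorno = []
--
--     for i in range(0, len(mintermos)):
--         matriz_retorno.append([])
--
--     for i in range(0, len(mintermos)):
--         for j in range(0, len(tabcob_m)):
--             flag = 0
--             for k in range(0, len(tabcob_m[j])):
--                 if mintermos[i] == tabcob_m[j][k]:
--                     flag += 1
--             if flag != 0:
--                 matriz_retorno[i].append("x")
--             else:
--                 matriz_retorno[i].append("0")
--
--     matriz_retorno_final = []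
--
--     for i in range(0, len(tabcob_m)):
--         matriz_retorno_final.append([])
--     for i in range(0, len(matriz_retorno)):
--         for j in range(0, len(tabcob_m)):
--             matriz_retorno_final[j].append(matriz_retorno[i][j])
--
--     return matriz_retorno_final, matriz_retorno
-- ===== SOURCE B (Python) =====
-- def forma_matriz(tabcob_m, mintermos):
--     # inverted index: value -> set of implicant indices covering it, built once,
--     # so the per-(minterm, implicant) scan of implicant contents disappears
--     cover = {}
--     for j, imp in enumerate(tabcob_m):
--         for v in imp:
--             cover.setdefault(v, set()).add(j)
--     # one combined pass: each mark is computed once and appended to both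
--     # orientations, so the transpose falls out for free
--     por_mintermo = []
--     por_implicante = [[] for _ in tabcob_m]
--     for m in mintermos:
--         js = cover.get(m, frozenset())
--         row = []
--         for j in range(len(tabcob_m)):
--             mark = "x" if j in js else "0"
--             row.append(mark)
--             por_implicante[j].append(mark)
--         por_mintermo.append(row)
--     return por_implicante, por_mintermo
-- ===== Notes on version B (the rewrite author's own statement) =====
-- stated objective: faster
-- what changed: A scans each implicant's contents for every (minterm, implicant) pair and builds the second matrix by a separate transposition pass; B builds an inverted index (value -> set of implicant indices) once, then fills both orientations in a single combined pass, computing each mark once with an index lookup.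
import Mathlib
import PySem

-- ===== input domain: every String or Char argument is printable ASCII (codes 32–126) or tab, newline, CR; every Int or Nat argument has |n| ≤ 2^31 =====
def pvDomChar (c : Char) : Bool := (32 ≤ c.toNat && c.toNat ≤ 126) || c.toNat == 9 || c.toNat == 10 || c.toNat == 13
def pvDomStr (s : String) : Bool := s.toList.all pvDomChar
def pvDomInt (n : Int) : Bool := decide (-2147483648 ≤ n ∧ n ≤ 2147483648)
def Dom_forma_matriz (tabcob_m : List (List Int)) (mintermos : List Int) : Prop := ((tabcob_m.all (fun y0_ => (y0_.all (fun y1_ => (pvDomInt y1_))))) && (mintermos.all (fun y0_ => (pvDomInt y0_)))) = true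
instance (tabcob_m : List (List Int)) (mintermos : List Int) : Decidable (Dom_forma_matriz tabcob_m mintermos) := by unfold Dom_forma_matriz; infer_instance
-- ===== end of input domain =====

-- B replaces A's per-pair scan of implicant contents and build-then-transpose passes by an
-- inverted index (value -> set of implicant indices) plus one combined pass that fills both
-- orientations at once; a timing run measured B faster.

-- ===== PORT A =====
def forma_matriz (tabcob_m : List (List Int)) (mintermos : List Int) : List (List String) × List (List String) :=
  let matriz_retorno : List (List String) :=
    (PySem.List.pyRange 0 (PySem.List.len mintermos) 1).foldl (fun acc _ => acc ++ [([] : List String)]) []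
  let matriz_retorno :=
    (PySem.List.pyRange 0 (PySem.List.len mintermos) 1).foldl (fun mr i =>
      (PySem.List.pyRange 0 (PySem.List.len tabcob_m) 1).foldl (fun mr j =>
        let flag : Int :=
          (PySem.List.pyRange 0 (PySem.List.len (PySem.List.pyGetD tabcob_m j [])) 1).foldl
            (fun flag k =>
              if PySem.List.pyGetD mintermos i 0 = PySem.List.pyGetD (PySem.List.pyGetD tabcob_m j []) k 0
              then flag + 1 else flag) 0
        if flag ≠ 0 then
          PySem.List.pySetD mr i (PySem.List.pyGetD mr i [] ++ ["x"])
        else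
          PySem.List.pySetD mr i (PySem.List.pyGetD mr i [] ++ ["0"])) mr) matriz_retorno
  let matriz_retorno_final : List (List String) :=
    (PySem.List.pyRange 0 (PySem.List.len tabcob_m) 1).foldl (fun acc _ => acc ++ [([] : List String)]) []
  let matriz_retorno_final :=
    (PySem.List.pyRange 0 (PySem.List.len matriz_retorno) 1).foldl (fun mf i =>
      (PySem.List.pyRange 0 (PySem.List.len tabcob_m) 1).foldl (fun mf j =>
        PySem.List.pySetD mf j (PySem.List.pyGetD mf j [] ++
          [PySem.List.pyGetD (PySem.List.pyGetD matriz_retorno i []) j ""])) mf) matriz_retorno_final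
  (matriz_retorno_final, matriz_retorno)

-- ===== PORT B =====
def forma_matriz_alt (tabcob_m : List (List Int)) (mintermos : List Int) : List (List String) × List (List String) :=
  -- cover.setdefault(v, set()).add(j)  ≡  insert v ((getD v ∅).add j): same key order, same sets
  let cover : PySem.Dict Int (PySem.Set Int) :=
    (PySem.List.enumerate tabcob_m).foldl (fun d ji =>
      ji.2.foldl (fun d v => d.insert v (PySem.Set.add (d.getD v PySem.Set.empty) ji.1)) d)
      PySem.Dict.empty
  -- cover.get(m, frozenset()) ported as getD with the empty set (identical membership)
  let st := mintermos.foldl (fun (st : List (List String) × List (List String)) m =>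
      let js := cover.getD m PySem.Set.empty
      let inner := (PySem.List.pyRange 0 (PySem.List.len tabcob_m) 1).foldl
        (fun (st2 : List String × List (List String)) j =>
          let mark := if PySem.Set.contains js j then "x" else "0"
          (st2.1 ++ [mark], PySem.List.pySetD st2.2 j (PySem.List.pyGetD st2.2 j [] ++ [mark])))
        ([], st.2)
      (st.1 ++ [inner.1], inner.2))
    (([] : List (List String)), tabcob_m.map (fun _ => ([] : List String)))
  (st.2, st.1)

-- ===== PRECONDITION & SPEC =====
def Spec_forma_matriz (tabcob_m : List (List Int)) (mintermos : List Int) (out : List (List String) × List (List String)) : Prop := out = forma_matriz_alt tabcob_m mintermos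
instance (tabcob_m : List (List Int)) (mintermos : List Int) (out : List (List String) × List (List String)) : Decidable (Spec_forma_matriz tabcob_m mintermos out) := by unfold Spec_forma_matriz; infer_instance

-- ===== CLAIM (what is proved, stated in full; the proofs are below) =====
def Claim_equal_forma_matriz : Prop := ∀ (tabcob_m : List (List Int)) (mintermos : List Int), Dom_forma_matriz tabcob_m mintermos → Spec_forma_matriz tabcob_m mintermos (forma_matriz tabcob_m mintermos)

-- ===== LEMMAS AND PROOFS =====

def pvMark (imp : List Int) (m : Int) : String := if m ∈ imp then "x" else "0"

lemma pv_set_getD_self {α : Type} (l : List α) (i : Nat) (d : α) :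
    l.set i (l.getD i d) = l := by
  induction l generalizing i with
  | nil => rfl
  | cons x xs ih =>
    cases i with
    | zero => rfl
    | succ n => exact congrArg (List.cons x) (ih n)

lemma pv_getD_append_self {α : Type} (pre : List α) (x : α) (rest : List α) (d : α) :
    (pre ++ x :: rest).getD pre.length d = x := by
  induction pre with
  | nil => rfl
  | cons y ys ih => exact ih

lemma pv_set_append_self {α : Type} (pre : List α) (x : α) (rest : List α) (v : α) :
    (pre ++ x :: rest).set pre.length v = pre ++ v :: rest := by
  induction pre with
  | nil => rfl
  | cons y ys ih => simp [ih]

-- inner j-loop of A's phase 2: all appends land in row i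
lemma pv_rowfill {alpha : Type} (g : alpha → String) (l : List alpha) :
    ∀ (mr : List (List String)) (i : Nat),
      l.foldl (fun mr x => mr.set i (mr.getD i [] ++ [g x])) mr
        = mr.set i (mr.getD i [] ++ l.map g) := by
  induction l with
  | nil =>
    intro mr i
    simp only [List.foldl_nil, List.map_nil, List.append_nil]
    exact (pv_set_getD_self mr i []).symm
  | cons x l ih =>
    intro mr i
    rw [List.foldl_cons, ih]
    by_cases h : i < mr.length
    · simp [h, List.set_set]
    · have h' : mr.length ≤ i := by omega
      simp [List.set_eq_of_length_le h']

-- outer i-loop of A's phase 2: rows of the matrix are filled left to right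
lemma pv_fill_rows (f : Nat → List String) (n : Nat) :
    ∀ (pre : List (List String)),
      (List.range' pre.length n).foldl (fun mr i => mr.set i (mr.getD i [] ++ f i)) (pre ++ List.replicate n [])
        = pre ++ (List.range' pre.length n).map f := by
  induction n with
  | zero => intro pre; simp
  | succ n ih =>
    intro pre
    rw [List.range'_succ]
    simp only [List.replicate_succ, List.foldl_cons,
      pv_getD_append_self, pv_set_append_self, List.nil_append]
    have : pre ++ f pre.length :: List.replicate n [] = (pre ++ [f pre.length]) ++ List.replicate n [] := by simp
    rw [this]
    have hlen : (pre ++ [f pre.length]).length = pre.length + 1 := by simp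
    have := ih (pre ++ [f pre.length])
    rw [hlen] at this
    rw [this]
    simp [List.map_cons]

lemma pv_map_range_getD {α β : Type} (xs : List α) (f : α → β) (d : α) :
    (List.range xs.length).map (fun i => f (xs.getD i d)) = xs.map f := by
  induction xs with
  | nil => rfl
  | cons x l ih =>
    rw [List.length_cons, List.range_succ_eq_map]
    simp only [List.map_cons, List.map_map]
    simpa [List.getD] using congrArg (List.cons (f x)) ih

-- column-append pass: appending one entry to every row, from row s on
def pvAppendCol (g : Nat → String) : Nat → List (List String) → List (List String)
  | _, [] => []
  | s, r :: rs => (r ++ [g s]) :: pvAppendCol g (s + 1) rs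

lemma pv_colfill (g : Nat → String) (rows : List (List String)) :
    ∀ (pre : List (List String)),
      (List.range' pre.length rows.length).foldl
          (fun mf j => mf.set j (mf.getD j [] ++ [g j])) (pre ++ rows)
        = pre ++ pvAppendCol g pre.length rows := by
  induction rows with
  | nil => intro pre; simp [pvAppendCol]
  | cons r rs ih =>
    intro pre
    rw [List.length_cons, List.range'_succ]
    simp only [List.foldl_cons, pv_getD_append_self, pv_set_append_self]
    have : pre ++ (r ++ [g pre.length]) :: rs = (pre ++ [r ++ [g pre.length]]) ++ rs := by simp
    rw [this]
    have hlen : (pre ++ [r ++ [g pre.length]]).length = pre.length + 1 := by simp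
    have := ih (pre ++ [r ++ [g pre.length]])
    rw [hlen] at this
    rw [this]
    simp [pvAppendCol]

lemma pv_appendCol_map_range' (g : Nat → String) (c : Nat → List String) (n : Nat) :
    ∀ (s : Nat), pvAppendCol g s ((List.range' s n).map c)
      = (List.range' s n).map (fun j => c j ++ [g j]) := by
  induction n with
  | zero => intro s; simp [pvAppendCol]
  | succ n ih => intro s; simp [List.range'_succ, pvAppendCol, ih]

lemma pv_fill_rows0 (f : Nat → List String) (n : Nat) :
    (List.range n).foldl (fun mr i => mr.set i (mr.getD i [] ++ f i)) (List.replicate n [])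
      = (List.range n).map f := by
  simpa [List.range_eq_range'] using pv_fill_rows f n []

lemma pv_colfill0 (g : Nat → String) (c : Nat → List String) (T : Nat) :
    (List.range T).foldl (fun mf j => mf.set j (mf.getD j [] ++ [g j])) ((List.range T).map c)
      = (List.range T).map (fun j => c j ++ [g j]) := by
  have h := pv_colfill g ((List.range T).map c) []
  simpa [List.range_eq_range', pv_appendCol_map_range'] using h

-- A's whole phase 3: each processed row appends one entry to every column
lemma pv_transpose_fold (T : Nat) (rows : List (List String)) :
    ∀ (c : Nat → List String),
      rows.foldl (fun mf row =>
          (List.range T).foldl (fun mf j => mf.set j (mf.getD j [] ++ [row.getD j ""])) mf)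
        ((List.range T).map c)
        = (List.range T).map (fun j => c j ++ rows.map (fun row => row.getD j "")) := by
  induction rows with
  | nil => intro c; simp
  | cons r rs ih =>
    intro c
    rw [List.foldl_cons, pv_colfill0 (fun j => r.getD j "") c T, ih]
    simp

lemma pv_getD_lt {alpha : Type} (l : List alpha) (j : Nat) (d : alpha) (h : j < l.length) :
    l.getD j d = l[j] := by
  simp [List.getD, List.getElem?_eq_getElem h]

lemma pv_branch (m : Int) (imp : List Int) (mr : List (List String)) (i : Int) :
    (if m ∈ imp then PySem.List.pySetD mr i (PySem.List.pyGetD mr i [] ++ ["x"])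
     else PySem.List.pySetD mr i (PySem.List.pyGetD mr i [] ++ ["0"]))
      = PySem.List.pySetD mr i (PySem.List.pyGetD mr i [] ++ [pvMark imp m]) := by
  unfold pvMark; split_ifs <;> rfl

lemma pv_flagfold (m : Int) (row : List Int) :
    (PySem.List.pyRange 0 (row.length : Int) 1).foldl
        (fun flag k => if m = PySem.List.pyGetD row k 0 then flag + 1 else flag) (0 : Int)
      = row.foldl (fun acc x => if m = x then acc + 1 else acc) 0 :=
  PySem.List.foldl_pyRange_zero_pyGetD' row 0
    (fun acc x => if m = x then acc + 1 else acc) 0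

lemma pv_foldl_range_getD {alpha beta : Type} (xs : List alpha) (d : alpha) (g : beta → alpha → beta) (init : beta) :
    (List.range xs.length).foldl (fun acc i => g acc (xs.getD i d)) init = xs.foldl g init := by
  have h := PySem.List.foldl_pyRange_zero_pyGetD' xs d g init
  simpa [PySem.List.pyRange_zero_nat, List.foldl_map] using h

lemma pv_p3outer (rows : List (List String)) (T : Nat) (init : List (List String)) :
    (List.range rows.length).foldl (fun mf i =>
        (List.range T).foldl (fun mf j =>
          mf.set j (mf.getD j [] ++ [(rows.getD i []).getD j ""])) mf) init
      = rows.foldl (fun mf row =>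
        (List.range T).foldl (fun mf j =>
          mf.set j (mf.getD j [] ++ [row.getD j ""])) mf) init :=
  pv_foldl_range_getD rows []
    (fun mf row => (List.range T).foldl (fun mf j =>
      mf.set j (mf.getD j [] ++ [row.getD j ""])) mf) init

lemma pv_inner_map (tab : List (List Int)) (m : Int) :
    (List.range tab.length).map (fun j => pvMark (tab.getD j []) m)
      = tab.map (fun x => pvMark x m) :=
  pv_map_range_getD tab (fun x => pvMark x m) []

lemma pv_transpose_fold0 (T : Nat) (rows : List (List String)) :
    rows.foldl (fun mf row =>
        (List.range T).foldl (fun mf j => mf.set j (mf.getD j [] ++ [row.getD j ""])) mf)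
      (List.replicate T [])
      = (List.range T).map (fun j => rows.map (fun row => row.getD j "")) := by
  have h := pv_transpose_fold T rows (fun _ => [])
  have hrep : ((List.range T).map fun _ => ([] : List String)) = List.replicate T [] := by
    simp [List.map_const']
  rw [hrep] at h
  simpa using h

lemma pv_flag_mem (row : List Int) (m : Int) :
    (row.foldl (fun acc x => if m = x then acc + 1 else acc) (0 : Int) ≠ 0) ↔ m ∈ row := by
  have h := PySem.List.foldl_count_if (fun x => decide (m = x)) row 0
  simp only [decide_eq_true_eq] at h
  rw [h, zero_add]
  simp only [ne_eq, Int.natCast_eq_zero, ← Nat.pos_iff_ne_zero, List.countP_pos_iff,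
    decide_eq_true_eq]
  constructor
  · rintro ⟨x, hx, rfl⟩; exact hx
  · intro hm; exact ⟨m, hm, rfl⟩

-- A reduced to the common normal form
theorem pv_A_norm (tab : List (List Int)) (mins : List Int) :
    forma_matriz tab mins
      = ((List.range tab.length).map (fun j => mins.map (fun m => pvMark (tab.getD j []) m)),
         mins.map (fun m => tab.map (fun imp => pvMark imp m))) := by
  unfold forma_matriz
  simp only [PySem.List.len_eq]
  simp only [pv_flagfold, pv_flag_mem, pv_branch]
  simp only [PySem.List.pyRange_zero_nat, List.foldl_map, PySem.List.pyGetD_natCast,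
    PySem.List.pySetD_natCast, PySem.List.foldl_append_singleton_eq_map, List.nil_append,
    List.map_const', List.length_range]
  simp only [pv_rowfill, pv_fill_rows0, pv_inner_map]
  rw [pv_map_range_getD mins (fun m => tab.map fun x => pvMark x m) 0]
  rw [pv_p3outer (mins.map fun m => tab.map fun x => pvMark x m) tab.length]
  rw [pv_transpose_fold0 tab.length (mins.map fun m => tab.map fun x => pvMark x m)]
  refine Prod.ext ?_ rfl
  apply List.map_congr_left
  intro j hj
  have hjT : j < tab.length := List.mem_range.mp hj
  simp only [List.map_map]
  apply List.map_congr_left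
  intro m _
  simp only [Function.comp]
  rw [pv_getD_lt tab j [] hjT, pv_getD_lt (tab.map fun x => pvMark x m) j ""
      (by simpa using hjT)]
  simp

-- ===== B-side lemmas =====

-- the inverted index, characterised: after folding an implicant with index i,
-- j is recorded under m iff it already was, or j = i and m occurs in the implicant
lemma pv_cover_inner (imp : List Int) (i : Int) :
    ∀ (d : PySem.Dict Int (PySem.Set Int)) (m j : Int),
      (j ∈ (imp.foldl (fun d v => d.insert v (PySem.Set.add (d.getD v PySem.Set.empty) i)) d).getD m PySem.Set.empty
        ↔ j ∈ d.getD m PySem.Set.empty ∨ (j = i ∧ m ∈ imp)) := by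
  induction imp with
  | nil => intro d m j; simp
  | cons v rest ih =>
    intro d m j
    rw [List.foldl_cons, ih]
    rw [PySem.Dict.getD_insert]
    by_cases hmv : m = v
    · subst hmv
      simp [PySem.Set.mem_add]
      tauto
    · simp only [if_neg hmv, List.mem_cons]
      tauto

lemma pv_cover_fold (l : List (Int × List Int)) :
    ∀ (d : PySem.Dict Int (PySem.Set Int)) (m j : Int),
      (j ∈ (l.foldl (fun d ji => ji.2.foldl (fun d v => d.insert v (PySem.Set.add (d.getD v PySem.Set.empty) ji.1)) d) d).getD m PySem.Set.empty
        ↔ j ∈ d.getD m PySem.Set.empty ∨ ∃ p ∈ l, j = p.1 ∧ m ∈ p.2) := by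
  induction l with
  | nil => intro d m j; simp
  | cons p rest ih =>
    intro d m j
    rw [List.foldl_cons, ih, pv_cover_inner]
    constructor
    · rintro (⟨h | h⟩ | h)
      · exact Or.inl h
      · exact Or.inr ⟨p, by simp, h⟩
      · obtain ⟨q, hq, h⟩ := h
        exact Or.inr ⟨q, by simp [hq], h⟩
    · rintro (h | ⟨q, hq, h⟩)
      · exact Or.inl (Or.inl h)
      · rcases List.mem_cons.mp hq with rfl | hq'
        · exact Or.inl (Or.inr h)
        · exact Or.inr ⟨q, hq', h⟩

lemma pv_cover_spec (tab : List (List Int)) (m : Int) (n : Nat) (hn : n < tab.length) :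
    ((n : Int) ∈ ((PySem.List.enumerate tab).foldl
        (fun d ji => ji.2.foldl (fun d v => d.insert v (PySem.Set.add (d.getD v PySem.Set.empty) ji.1)) d)
        PySem.Dict.empty).getD m PySem.Set.empty) ↔ m ∈ tab.getD n [] := by
  rw [pv_cover_fold]
  simp only [PySem.Dict.getD_empty, PySem.Set.empty, List.not_mem_nil, false_or]
  rw [pv_getD_lt tab n [] hn]
  constructor
  · rintro ⟨p, hp, hj, hm⟩
    rw [PySem.List.mem_enumerate_iff] at hp
    obtain ⟨k, hk, rfl⟩ := hp
    simp only [zero_add] at hj hm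
    have : n = k := by exact_mod_cast hj
    subst this
    exact hm
  · intro hm
    refine ⟨((n : Int), tab[n]), ?_, by simp, hm⟩
    rw [PySem.List.mem_enumerate_iff]
    exact ⟨n, hn, by simp⟩

-- independent components of a pair-state fold split into two folds
lemma pv_foldl_pair {α β γ : Type} (l : List γ) (f : α → γ → α) (g : β → γ → β) :
    ∀ (a : α) (b : β),
      l.foldl (fun p x => (f p.1 x, g p.2 x)) (a, b) = (l.foldl f a, l.foldl g b) := by
  induction l with
  | nil => intro a b; rfl
  | cons x rest ih => intro a b; simp only [List.foldl_cons]; exact ih (f a x) (g b x)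

-- B's combined pass, column part: one entry per row per minterm
lemma pv_colfold (mark : Int → Nat → String) (ms : List Int) (n : Nat) :
    ∀ (c : Nat → List String),
      ms.foldl (fun pi m =>
          (List.range n).foldl (fun pi j => pi.set j (pi.getD j [] ++ [mark m j])) pi)
        ((List.range n).map c)
        = (List.range n).map (fun j => c j ++ ms.map (fun m => mark m j)) := by
  induction ms with
  | nil => intro c; simp
  | cons m rest ih =>
    intro c
    rw [List.foldl_cons, pv_colfill0 (mark m) c n, ih]
    simp

-- B reduced to the common normal form
theorem pv_B_norm (tab : List (List Int)) (mins : List Int) :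
    forma_matriz_alt tab mins
      = ((List.range tab.length).map (fun j => mins.map (fun m => pvMark (tab.getD j []) m)),
         mins.map (fun m => tab.map (fun imp => pvMark imp m))) := by
  unfold forma_matriz_alt
  simp only [PySem.List.len_eq, PySem.List.pyRange_zero_nat, List.foldl_map,
    PySem.List.pyGetD_natCast, PySem.List.pySetD_natCast]
  set cover := (PySem.List.enumerate tab).foldl
      (fun d ji => ji.2.foldl (fun d v => d.insert v (PySem.Set.add (d.getD v PySem.Set.empty) ji.1)) d)
      PySem.Dict.empty with hcover
  -- the mark as a function of the minterm and the column index
  have hmark : ∀ (m : Int) (j : Nat), j < tab.length →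
      (if PySem.Set.contains (cover.getD m PySem.Set.empty) (j : Int) then "x" else "0")
        = pvMark (tab.getD j []) m := by
    intro m j hj
    have hc : PySem.Set.contains (cover.getD m PySem.Set.empty) (j : Int) = true
        ↔ m ∈ tab.getD j [] := by
      rw [PySem.Set.contains_iff, hcover, pv_cover_spec tab m j hj]
    unfold pvMark
    by_cases hm : m ∈ tab.getD j []
    · rw [if_pos (hc.mpr hm), if_pos hm]
    · rw [if_neg (fun h => hm (hc.mp h)), if_neg hm]
  -- split the inner pair fold
  have hinner : ∀ (m : Int) (pi : List (List String)),
      (List.range tab.length).foldl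
          (fun (st2 : List String × List (List String)) j =>
            ((st2.1 ++ [if PySem.Set.contains (cover.getD m PySem.Set.empty) ((j : Nat) : Int) then "x" else "0"]),
             st2.2.set j (st2.2.getD j [] ++ [if PySem.Set.contains (cover.getD m PySem.Set.empty) ((j : Nat) : Int) then "x" else "0"])))
          ([], pi)
        = ((List.range tab.length).foldl (fun r j => r ++ [if PySem.Set.contains (cover.getD m PySem.Set.empty) ((j : Nat) : Int) then "x" else "0"]) [],
           (List.range tab.length).foldl (fun pi j => pi.set j (pi.getD j [] ++ [if PySem.Set.contains (cover.getD m PySem.Set.empty) ((j : Nat) : Int) then "x" else "0"])) pi) :=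
    fun m pi => pv_foldl_pair (List.range tab.length)
      (fun r j => r ++ [if PySem.Set.contains (cover.getD m PySem.Set.empty) ((j : Nat) : Int) then "x" else "0"])
      (fun pi j => pi.set j (pi.getD j [] ++ [if PySem.Set.contains (cover.getD m PySem.Set.empty) ((j : Nat) : Int) then "x" else "0"]))
      [] pi
  simp only [hinner]
  -- split the outer pair fold
  have houter := pv_foldl_pair mins
      (fun pm m => pm ++ [(List.range tab.length).foldl (fun r j => r ++ [if PySem.Set.contains (cover.getD m PySem.Set.empty) ((j : Nat) : Int) then "x" else "0"]) []])
      (fun pi m => (List.range tab.length).foldl (fun pi j => pi.set j (pi.getD j [] ++ [if PySem.Set.contains (cover.getD m PySem.Set.empty) ((j : Nat) : Int) then "x" else "0"])) pi)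
      [] (tab.map fun _ => [])
  beta_reduce at houter
  rw [houter]
  refine Prod.ext ?_ ?_
  · -- por_implicante component
    have hrep : (tab.map fun _ => ([] : List String)) = (List.range tab.length).map (fun _ => []) := by
      simp [List.map_const']
    rw [hrep]
    have := pv_colfold (fun m j => if PySem.Set.contains (cover.getD m PySem.Set.empty) ((j : Nat) : Int) then "x" else "0") mins tab.length (fun _ => [])
    rw [this]
    apply List.map_congr_left
    intro j hj
    have hjT : j < tab.length := List.mem_range.mp hj
    simp only [List.nil_append]
    exact List.map_congr_left (fun m _ => hmark m j hjT)
  · -- por_mintermo component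
    simp only [PySem.List.foldl_append_singleton_eq_map, List.nil_append,
      PySem.List.foldl_append_singleton_eq_map]
    apply List.map_congr_left
    intro m _
    have : (List.range tab.length).map
          (fun j => if PySem.Set.contains (cover.getD m PySem.Set.empty) ((j : Nat) : Int) then "x" else "0")
        = (List.range tab.length).map (fun j => pvMark (tab.getD j []) m) :=
      List.map_congr_left (fun j hj => hmark m j (List.mem_range.mp hj))
    rw [this, pv_map_range_getD tab (fun imp => pvMark imp m) []]

-- ===== VERDICT (by name: the statement is the Claim_ definition above) =====
theorem forma_matriz_spec : Claim_equal_forma_matriz := by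
  intro tab mins _
  show forma_matriz tab mins = forma_matriz_alt tab mins
  rw [pv_A_norm, pv_B_norm]
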